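-- pv_equiv track=rewrite | github.com/QuinnTheobald/survivor-alliances | collect_multi_season.py | calculate_alignments
-- ===== SOURCE A (Python) =====
-- from collections import defaultdict
--
-- def calculate_alignments(voting_history):
--     """Calculate how many times each pair voted together."""
--     alignment_counts = defaultdict(int)
--
--     for tribal_council in voting_history:
--         votes = tribal_council.get('votes', {})
--         voters = list(votes.keys())
--
--         for i, voter1 in enumerate(voters):
--             for voter2 in voters[i+1:]:
--                 if votes[voter1] == votes[voter2]:
--                     pair = tuple(sorted([voter1, voter2]))
--                     alignment_counts[pair] += 1
--
--     return alignment_counts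
-- ===== SOURCE B (Python) =====
-- def calculate_alignments(voting_history):
--     """Calculate how many times each pair voted together.
--
--     One pass per council: bucket voters by vote target, then emit each
--     voter's later same-target partners directly (no V^2 pair scan).
--     """
--     alignment_counts = {}
--     for tribal_council in voting_history:
--         votes = tribal_council.get('votes', {})
--         groups = {}
--         for voter, target in votes.items():
--             groups.setdefault(target, []).append(voter)
--         pos = {}
--         for voter1, target in votes.items():
--             k = pos.get(target, 0) + 1
--             pos[target] = k
--             for voter2 in groups[target][k:]:
--                 pair = (voter1, voter2) if voter1 <= voter2 else (voter2, voter1)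
--                 alignment_counts[pair] = alignment_counts.get(pair, 0) + 1
--     return alignment_counts
-- ===== Notes on version B (the rewrite author's own statement) =====
-- stated objective: alternative
-- what changed: Replaces A's all-pairs double scan per council by bucketing voters by vote target once and emitting each voter's later same-target partners directly from its bucket, so only aligned pairs are ever enumerated.
import Mathlib
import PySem

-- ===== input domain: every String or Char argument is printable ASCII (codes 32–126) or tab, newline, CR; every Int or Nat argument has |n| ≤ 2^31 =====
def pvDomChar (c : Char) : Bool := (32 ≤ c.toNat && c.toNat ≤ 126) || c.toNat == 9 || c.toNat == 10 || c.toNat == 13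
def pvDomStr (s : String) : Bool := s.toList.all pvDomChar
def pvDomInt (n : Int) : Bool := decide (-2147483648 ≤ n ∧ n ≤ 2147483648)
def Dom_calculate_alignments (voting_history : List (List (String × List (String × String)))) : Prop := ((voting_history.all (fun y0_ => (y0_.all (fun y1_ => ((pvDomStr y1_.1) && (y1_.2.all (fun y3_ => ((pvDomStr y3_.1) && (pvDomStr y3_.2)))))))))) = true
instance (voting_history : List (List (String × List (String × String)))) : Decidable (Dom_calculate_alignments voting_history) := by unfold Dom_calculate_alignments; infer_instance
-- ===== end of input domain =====

-- B replaces A's all-pairs scan per council by bucketing voters by vote target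
-- and emitting each voter's later same-target partners from its bucket, so only
-- aligned pairs are enumerated (objective: alternative algorithm, same result).

-- ===== PORT A =====
-- pair = tuple(sorted([voter1, voter2]))
def pvSortPair (v1 v2 : String) : String × String :=
  match PySem.List.sorted [v1, v2] (fun x => x) false with
  | [a, b] => (a, b)
  | _ => (v1, v2)

def calculate_alignments (voting_history : List (List (String × List (String × String)))) : List (String × String × Int) :=
  let alignment_counts :=
    voting_history.foldl (fun counts tribal_council =>
      -- votes = tribal_council.get('votes', {})  (assoc-list dict: first binding wins)
      let votes := (tribal_council.lookup "votes").getD []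
      -- voters = list(votes.keys())
      let voters := PySem.List.dedup (votes.map (·.1))
      (PySem.List.enumerate voters).foldl (fun counts iv =>
        (PySem.List.slice voters (some (iv.1 + 1)) none).foldl (fun counts voter2 =>
          if (votes.lookup iv.2).getD "" = (votes.lookup voter2).getD "" then
            counts.modify (pvSortPair iv.2 voter2) 0 (· + 1)
          else counts) counts) counts)
      PySem.Dict.empty
  alignment_counts.items.map (fun p => (p.1.1, p.1.2, p.2))

-- ===== PORT B =====
def calculate_alignments_alt (voting_history : List (List (String × List (String × String)))) : List (String × String × Int) :=
  let alignment_counts :=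
    voting_history.foldl (fun counts tribal_council =>
      -- votes = tribal_council.get('votes', {})  (assoc-list dict: first binding wins)
      let votes := (tribal_council.lookup "votes").getD []
      -- votes.items(): distinct keys in first-occurrence order, first binding wins
      let items := (PySem.List.dedup (votes.map (·.1))).map (fun v => (v, (votes.lookup v).getD ""))
      -- for voter, target in votes.items(): groups.setdefault(target, []).append(voter)
      let groups := items.foldl (fun g p => g.modify p.2 [] (· ++ [p.1])) PySem.Dict.empty
      -- second loop over votes.items(), pos tracks each voter's position in its bucket
      (items.foldl (fun st p =>
          let k := st.1.getD p.2 0 + 1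
          (st.1.insert p.2 k,
           (PySem.List.slice (groups.getD p.2 []) (some k) none).foldl (fun c voter2 =>
              let pair := if p.1 ≤ voter2 then (p.1, voter2) else (voter2, p.1)
              c.insert pair (c.getD pair 0 + 1)) st.2))
        ((PySem.Dict.empty : PySem.Dict String Int), counts)).2)
      PySem.Dict.empty
  alignment_counts.items.map (fun p => (p.1.1, p.1.2, p.2))

-- ===== PRECONDITION & SPEC =====
def Spec_calculate_alignments (voting_history : List (List (String × List (String × String)))) (out : List (String × String × Int)) : Prop := out = calculate_alignments_alt voting_history
instance (voting_history : List (List (String × List (String × String)))) (out : List (String × String × Int)) : Decidable (Spec_calculate_alignments voting_history out) := by unfold Spec_calculate_alignments; infer_instance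

-- ===== CLAIM (what is proved, stated in full; the proofs are below) =====
def Claim_equal_calculate_alignments : Prop := ∀ (voting_history : List (List (String × List (String × String)))), Dom_calculate_alignments voting_history → Spec_calculate_alignments voting_history (calculate_alignments voting_history)

-- ===== LEMMAS AND PROOFS =====

-- B's tie-free two-element sort equals A's
def pvPair (v1 v2 : String) : String × String :=
  if v1 ≤ v2 then (v1, v2) else (v2, v1)

lemma pvSortPair_eq (v1 v2 : String) : pvSortPair v1 v2 = pvPair v1 v2 := by
  unfold pvSortPair pvPair
  by_cases h : v1 ≤ v2
  · simp only [PySem.List.sorted, PySem.List.insertBy, List.foldl, h, if_true]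
    rw [if_neg (by simp [not_lt.mpr h])]
  · simp only [PySem.List.sorted, PySem.List.insertBy, List.foldl, h, if_false]
    rw [if_pos (by simp [not_le.mp h])]

def pvBump (c : PySem.Dict (String × String) Int) (p : String × String) : PySem.Dict (String × String) Int :=
  c.modify p 0 (· + 1)

-- the canonical per-council list of aligned pairs, in A's emission order
def pvPairs : List (String × String) → List (String × String)
  | [] => []
  | (v, t) :: rest => ((rest.filter (fun q => q.2 == t)).map (fun q => pvPair v q.1)) ++ pvPairs rest

-- A's enumerate/slice double loop, reduced to a bump-fold over pvPairs
lemma pv_A_enum (val : String → String) :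
    ∀ (suff full : List String) (s : ℕ) (c : PySem.Dict (String × String) Int),
      full.drop s = suff →
      (PySem.List.enumerate suff (s : Int)).foldl (fun c iv =>
        (PySem.List.slice full (some (iv.1 + 1)) none).foldl (fun c v2 =>
          if val iv.2 = val v2 then c.modify (pvSortPair iv.2 v2) 0 (· + 1) else c) c) c
      = (pvPairs (suff.map (fun v => (v, val v)))).foldl pvBump c := by
  intro suff
  induction suff with
  | nil => intro full s c h; simp [PySem.List.enumerate_nil, pvPairs]
  | cons v rest ih =>
    intro full s c h
    have hfull : full.drop (s + 1) = rest := by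
      have h1 : List.drop 1 (List.drop s full) = List.drop (s + 1) full := List.drop_drop
      rw [← h1, h]
      rfl
    have hslice : PySem.List.slice full (some ((s : Int) + 1)) none = rest := by
      have h0 : (0 : Int) ≤ (s : Int) + 1 := by positivity
      rw [PySem.List.slice_from _ h0]
      have h2 : ((s : Int) + 1).toNat = s + 1 := by omega
      rw [h2, hfull]
    have hchunk : ∀ c0 : PySem.Dict (String × String) Int,
        (PySem.List.slice full (some ((s : Int) + 1)) none).foldl (fun c v2 =>
            if val v = val v2 then c.modify (pvSortPair v v2) 0 (· + 1) else c) c0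
        = (((rest.map (fun x => (x, val x))).filter (fun q => q.2 == val v)).map
            (fun q => pvPair v q.1)).foldl pvBump c0 := by
      intro c0
      rw [hslice, PySem.List.foldl_ite_eq_foldl_filter, List.foldl_map]
      have hf : (rest.map (fun x => (x, val x))).filter (fun q => q.2 == val v)
          = (rest.filter (fun v2 => decide (val v = val v2))).map (fun x => (x, val x)) := by
        rw [List.filter_map]
        apply congrArg
        apply List.filter_congr
        intro x _
        show (val x == val v) = decide (val v = val x)
        by_cases hx : val v = val x
        · simp [hx]
        · have hx' : val x ≠ val v := fun e => hx e.symm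
          simp [hx, hx']
      rw [hf, List.foldl_map]
      apply PySem.List.foldl_congr_mem
      intro acc x _
      rw [pvSortPair_eq]
      rfl
    rw [PySem.List.enumerate_cons, List.foldl_cons]
    dsimp only
    rw [hchunk c]
    have hcast : (s : Int) + 1 = ((s + 1 : Nat) : Int) := by push_cast; ring
    rw [hcast, ih full (s + 1) _ hfull]
    simp only [List.map_cons, pvPairs, List.foldl_append]

-- the bucket built by B's first loop, characterised
lemma pv_groups (items : List (String × String)) (t : String) :
    (items.foldl (fun g p => g.modify p.2 [] (· ++ [p.1])) PySem.Dict.empty).getD t []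
      = (items.filter (fun q => q.2 == t)).map (·.1) := by
  have hsw : items.foldl (fun g p => g.modify p.2 [] (· ++ [p.1])) PySem.Dict.empty
      = (items.map Prod.swap).foldl (fun g q => PySem.Dict.modify g q.1 [] (· ++ [q.2]))
          PySem.Dict.empty := by
    rw [List.foldl_map]
    rfl
  rw [hsw, PySem.Dict.getD_foldl_modify_append, PySem.Dict.getD_empty]
  rw [List.filter_map, List.map_map]
  have hp : ((fun (p : String × String) => p.1 == t) ∘ Prod.swap) = (fun q => q.2 == t) := by
    funext q
    rfl
  have hm : ((fun (x : String × String) => x.2) ∘ Prod.swap) = (fun (x : String × String) => x.1) := by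
    funext q
    rfl
  rw [hp, hm]
  exact List.nil_append _

-- B's second loop, reduced to the same bump-fold over pvPairs
lemma pv_B_loop (all : List (String × String)) :
    ∀ (rest pre : List (String × String)) (pos : PySem.Dict String Int)
      (c : PySem.Dict (String × String) Int),
      all = pre ++ rest →
      (∀ t, pos.getD t 0 = (pre.countP (fun q => q.2 == t) : Int)) →
      (rest.foldl (fun st p =>
          (st.1.insert p.2 (st.1.getD p.2 0 + 1),
           (PySem.List.slice ((all.filter (fun q => q.2 == p.2)).map (·.1))
               (some (st.1.getD p.2 0 + 1)) none).foldl
             (fun c voter2 =>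
               c.insert (if p.1 ≤ voter2 then (p.1, voter2) else (voter2, p.1))
                 ((c.getD (if p.1 ≤ voter2 then (p.1, voter2) else (voter2, p.1)) 0) + 1)) st.2))
        (pos, c)).2
      = (pvPairs rest).foldl pvBump c := by
  intro rest
  induction rest with
  | nil => intro pre pos c _ _; simp [pvPairs]
  | cons p rest' ih =>
    intro pre pos c hall hpos
    obtain ⟨v, t⟩ := p
    rw [List.foldl_cons]
    dsimp only
    rw [hpos t]
    have hk : (((pre.countP (fun q => q.2 == t) : Nat) : Int) + 1).toNat
        = pre.countP (fun q => q.2 == t) + 1 := by omega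
    have hfilt : (all.filter (fun q => q.2 == t)).map (·.1)
        = ((pre.filter (fun q => q.2 == t)).map (·.1) ++ [v])
            ++ (rest'.filter (fun q => q.2 == t)).map (·.1) := by
      rw [hall, List.filter_append, List.filter_cons]
      simp
    have hlen : ((pre.filter (fun q => q.2 == t)).map (·.1) ++ [v]).length
        = pre.countP (fun q => q.2 == t) + 1 := by
      simp [List.countP_eq_length_filter]
    have h0 : (0 : Int) ≤ ((pre.countP (fun q => q.2 == t) : Nat) : Int) + 1 := by positivity
    have hslice : PySem.List.slice ((all.filter (fun q => q.2 == t)).map (·.1))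
        (some (((pre.countP (fun q => q.2 == t) : Nat) : Int) + 1)) none
        = (rest'.filter (fun q => q.2 == t)).map (·.1) := by
      rw [PySem.List.slice_from _ h0, hk, hfilt, List.drop_left' hlen]
    rw [hslice]
    have hinner :
        ((rest'.filter (fun q => q.2 == t)).map (·.1)).foldl
          (fun c voter2 =>
            c.insert (if v ≤ voter2 then (v, voter2) else (voter2, v))
              ((c.getD (if v ≤ voter2 then (v, voter2) else (voter2, v)) 0) + 1)) c
        = ((rest'.filter (fun q => q.2 == t)).map (fun q => pvPair v q.1)).foldl pvBump c := by
      rw [List.foldl_map, List.foldl_map]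
      rfl
    rw [hinner]
    have hpos' : ∀ t', (pos.insert t (((pre.countP (fun q => q.2 == t) : Nat) : Int) + 1)).getD t' 0
        = ((pre ++ [(v, t)]).countP (fun q => q.2 == t') : Int) := by
      intro t'
      rw [PySem.Dict.getD_insert, List.countP_append]
      by_cases ht : t' = t
      · rw [if_pos ht, ht]
        have h1 : [(v, t)].countP (fun q => q.2 == t) = 1 := by simp
        rw [h1]
        push_cast
        ring
      · rw [if_neg ht, hpos t']
        have h1 : [(v, t)].countP (fun q => q.2 == t') = 0 := by
          simp [Ne.symm ht]
        rw [h1]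
        push_cast
        ring
    rw [ih (pre ++ [(v, t)]) _ _ (by rw [hall]; simp) hpos']
    simp only [pvPairs, List.foldl_append]

-- per-council: A's step equals B's step
lemma pv_council (votes : List (String × String)) (c : PySem.Dict (String × String) Int) :
    (PySem.List.enumerate (PySem.List.dedup (votes.map (·.1)))).foldl (fun c iv =>
      (PySem.List.slice (PySem.List.dedup (votes.map (·.1))) (some (iv.1 + 1)) none).foldl (fun c v2 =>
        if (votes.lookup iv.2).getD "" = (votes.lookup v2).getD "" then
          c.modify (pvSortPair iv.2 v2) 0 (· + 1)
        else c) c) c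
    = (let items := (PySem.List.dedup (votes.map (·.1))).map (fun v => (v, (votes.lookup v).getD ""))
       let groups := items.foldl (fun g p => g.modify p.2 [] (· ++ [p.1])) PySem.Dict.empty
       (items.foldl (fun st p =>
          let k := st.1.getD p.2 0 + 1
          (st.1.insert p.2 k,
           (PySem.List.slice (groups.getD p.2 []) (some k) none).foldl (fun c voter2 =>
              let pair := if p.1 ≤ voter2 then (p.1, voter2) else (voter2, p.1)
              c.insert pair (c.getD pair 0 + 1)) st.2))
        ((PySem.Dict.empty : PySem.Dict String Int), c)).2) := by
  dsimp only
  simp only [pv_groups]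
  rw [pv_B_loop ((PySem.List.dedup (votes.map (·.1))).map (fun v => (v, (votes.lookup v).getD "")))
      ((PySem.List.dedup (votes.map (·.1))).map (fun v => (v, (votes.lookup v).getD ""))) []
      PySem.Dict.empty c (List.nil_append _).symm
      (by intro t; simp [PySem.Dict.getD_empty])]
  have h0 : ((0 : Nat) : Int) = (0 : Int) := rfl
  have := pv_A_enum (fun v => (votes.lookup v).getD "")
    (PySem.List.dedup (votes.map (·.1))) (PySem.List.dedup (votes.map (·.1))) 0 c
    List.drop_zero
  rw [h0] at this
  exact this

-- ===== VERDICT (by name: the statement is the Claim_ definition above) =====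
theorem calculate_alignments_spec : Claim_equal_calculate_alignments := by
  intro vh _
  unfold Spec_calculate_alignments calculate_alignments calculate_alignments_alt
  dsimp only
  congr 1
  congr 1
  apply PySem.List.foldl_congr_mem
  intro acc council _
  exact pv_council ((council.lookup "votes").getD []) acc
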